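-- pv_equiv track=rewrite | github.com/TonyJiang17/Juggling_1000_Files | phonebook/phonebook.py | firstnamesize
-- ===== SOURCE A (Python) =====
-- def firstnamesize(s):
--     """return the number of letters for the first name
--     """
--     if(s == ""):
--         return 0
--     else:
--         if(',' in s):
--             if (s[-1] == ' ' ):
--                 return -1
--             else:
--                 return 1 + firstnamesize(s[:-1])
--         else:
--             if (s[0] == ' ' ):
--                 return 0
--             else:
--                 return 1 + firstnamesize(s[1:])
-- ===== SOURCE B (Python) =====
-- def firstnamesize(s):
--     """return the number of letters for the first name
--     """
--     i, j, count = 0, len(s), 0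
--     while i < j:
--         if ',' in s[i:j]:
--             if s[j - 1] == ' ':
--                 return count - 1
--             count += 1
--             j -= 1
--         else:
--             if s[i] == ' ':
--                 return count
--             count += 1
--             i += 1
--     return count
-- ===== Notes on version B (the rewrite author's own statement) =====
-- stated objective: faster
-- what changed: Replaced A's recursion (a freshly sliced copy of the whole string per call plus a call frame) by a single iterative loop over a shrinking index window [i, j) of the original string with an accumulator, removing the recursion and the per-step full-string copies.
import Mathlib
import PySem

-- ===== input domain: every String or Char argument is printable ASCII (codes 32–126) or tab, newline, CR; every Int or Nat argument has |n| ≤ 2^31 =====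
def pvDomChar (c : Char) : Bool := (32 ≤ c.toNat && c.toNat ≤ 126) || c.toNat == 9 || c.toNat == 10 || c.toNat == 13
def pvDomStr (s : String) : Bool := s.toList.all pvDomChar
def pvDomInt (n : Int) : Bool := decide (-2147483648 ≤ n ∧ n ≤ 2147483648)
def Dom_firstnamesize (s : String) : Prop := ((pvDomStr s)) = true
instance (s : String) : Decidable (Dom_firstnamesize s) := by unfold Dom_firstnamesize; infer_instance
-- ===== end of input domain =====

-- B replaces A's recursion (which copies a shrunken string each step) by a single loop over an
-- index window [i, j) of the original string, accumulating the count; same return value everywhere.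

-- ===== PORT A =====
-- recursion on the character list; s[-1] on nonempty s = getLast, s[:-1] = dropLast,
-- s[0] = head, s[1:] = tail, ',' in s = list membership — all exact for nonempty l
def fA (l : List Char) : Int :=
  if h : l = [] then 0
  else
    if ',' ∈ l then
      if l.getLast h = ' ' then -1
      else 1 + fA l.dropLast
    else
      if l.head h = ' ' then 0
      else 1 + fA l.tail
termination_by l.length
decreasing_by
· have := List.length_pos_iff.mpr h
  simp [List.length_dropLast]; omega
· have := List.length_pos_iff.mpr h
  simp [List.length_tail]; omega

def firstnamesize (s : String) : Int := fA s.toList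

-- ===== PORT B =====
-- the while loop: i, j Nat indices into the fixed list l; ',' in s[i:j] is membership in
-- (l.drop i).take (j-i) (exact for 0 ≤ i ≤ j); s[j-1] / s[i] via getD (indices are always
-- in range while i < j ≤ len, where the loop runs)
def goB (l : List Char) (i j : Nat) (count : Int) : Int :=
  if _h : i < j then
    if ',' ∈ (l.drop i).take (j - i) then
      if l.getD (j - 1) ' ' = ' ' then count - 1
      else goB l i (j - 1) (count + 1)
    else
      if l.getD i ' ' = ' ' then count
      else goB l (i + 1) j (count + 1)
  else count
termination_by j - i
decreasing_by
· omega
· omega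

def firstnamesize_alt (s : String) : Int := goB s.toList 0 s.toList.length 0

-- ===== PRECONDITION & SPEC =====
def Spec_firstnamesize (s : String) (out : Int) : Prop := out = firstnamesize_alt s
instance (s : String) (out : Int) : Decidable (Spec_firstnamesize s out) := by unfold Spec_firstnamesize; infer_instance

-- ===== CLAIM (what is proved, stated in full; the proofs are below) =====
def Claim_equal_firstnamesize : Prop := ∀ (s : String), Dom_firstnamesize s → Spec_firstnamesize s (firstnamesize s)

-- ===== LEMMAS AND PROOFS =====

-- loop invariant: on the window w = s[i:j], the loop returns count + fA w
lemma goB_eq_fA (l : List Char) (k i j : Nat) (hk : j - i = k) (hj : j ≤ l.length)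
    (c : Int) : goB l i j c = c + fA ((l.drop i).take (j - i)) := by
  induction k generalizing i j c with
  | zero =>
    rw [goB, fA]
    simp [Nat.not_lt.mpr (by omega : j ≤ i), hk]
  | succ k ih =>
    have hij : i < j := by omega
    have hwlen : ((l.drop i).take (j - i)).length = j - i := by
      simp [List.length_take, List.length_drop]; omega
    have hwne : (l.drop i).take (j - i) ≠ [] := by
      intro h; rw [h] at hwlen; simp at hwlen; omega
    rw [goB, fA]
    rw [dif_pos hij, dif_neg hwne]
    have hlast : ((l.drop i).take (j - i)).getLast hwne = l.getD (j - 1) ' ' := by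
      rw [List.getLast_eq_getElem]
      rw [List.getD_eq_getElem l ' ' (by omega : j - 1 < l.length)]
      rw [List.getElem_take, List.getElem_drop]
      congr 1
      rw [hwlen]
      omega
    have hhead : ((l.drop i).take (j - i)).head hwne = l.getD i ' ' := by
      rw [List.head_eq_getElem]
      rw [List.getD_eq_getElem l ' ' (by omega : i < l.length)]
      rw [List.getElem_take, List.getElem_drop]
      simp
    have hdrop : ((l.drop i).take (j - i)).dropLast = (l.drop i).take (j - 1 - i) := by
      rw [List.dropLast_eq_take, hwlen, List.take_take]
      congr 1
      omega
    have htail : ((l.drop i).take (j - i)).tail = (l.drop (i + 1)).take (j - (i + 1)) := by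
      rw [← List.drop_one, List.drop_take, List.drop_drop]
      congr 1
    by_cases hc : ',' ∈ (l.drop i).take (j - i)
    · rw [if_pos hc, if_pos hc, hlast]
      by_cases hsp : l.getD (j - 1) ' ' = ' '
      · rw [if_pos hsp, if_pos hsp]
        ring
      · rw [if_neg hsp, if_neg hsp]
        rw [ih i (j - 1) (by omega) (by omega)]
        rw [hdrop]
        ring
    · rw [if_neg hc, if_neg hc, hhead]
      by_cases hsp : l.getD i ' ' = ' '
      · rw [if_pos hsp, if_pos hsp]
        ring
      · rw [if_neg hsp, if_neg hsp]
        rw [ih (i + 1) j (by omega) hj]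
        rw [htail]
        ring

-- ===== VERDICT (by name: the statement is the Claim_ definition above) =====
theorem firstnamesize_spec : Claim_equal_firstnamesize := by
  intro s _
  unfold Spec_firstnamesize firstnamesize firstnamesize_alt
  rw [goB_eq_fA s.toList s.toList.length 0 s.toList.length rfl (le_refl _)]
  simp [List.take_of_length_le]
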